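-- pv_equiv track=rewrite | github.com/Jazende/AdventOfCode | aoc_19_04_recursion.py | returning_digits
-- ===== SOURCE A (Python) =====
-- def returning_digits(cur=None):
--     cur = 0 if cur is None else cur
--     last_digit = max(cur%10, 1) # als cur = 0 dan is last_digit = 0, mag niet, daarom altijd minstens last_digit = 1
--
--     if not len(str(cur)) == 6:
--         for dig in range(last_digit, 10):
--             yield from returning_digits(cur*10+dig)
--     else:
--         yield cur
-- ===== SOURCE B (Python) =====
-- def returning_digits(cur=None):
--     vals = [0 if cur is None else cur]
--     while len(str(vals[0])) != 6:
--         vals = [v * 10 + d for v in vals for d in range(max(v % 10, 1), 10)]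
--     yield from vals
-- ===== Notes on version B (the rewrite author's own statement) =====
-- stated objective: alternative
-- what changed: Replaces the depth-first recursive generator by an iterative breadth-first expansion: a list of prefixes is grown one digit per round with a comprehension until the 6-character length is reached, no recursion and no per-leaf generator chain.
import Mathlib
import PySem

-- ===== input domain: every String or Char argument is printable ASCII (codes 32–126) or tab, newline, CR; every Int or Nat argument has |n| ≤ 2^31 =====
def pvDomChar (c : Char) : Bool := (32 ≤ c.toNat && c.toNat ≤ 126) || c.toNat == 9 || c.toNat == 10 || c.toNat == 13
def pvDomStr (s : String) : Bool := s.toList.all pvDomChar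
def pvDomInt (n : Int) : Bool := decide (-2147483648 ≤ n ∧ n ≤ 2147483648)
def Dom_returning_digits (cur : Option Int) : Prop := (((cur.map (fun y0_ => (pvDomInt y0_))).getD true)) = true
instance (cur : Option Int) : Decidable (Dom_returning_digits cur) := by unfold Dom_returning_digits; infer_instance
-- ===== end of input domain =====

-- B replaces A's recursive generator by an iterative level-by-level list expansion (BFS over digit
-- prefixes instead of DFS recursion); same return values, same order, on all inputs admitted by Pre_.


-- ===== PORT A =====
-- A is a recursive generator; its port returns the list of yielded values.  The recursion depth is
-- at most 7 on every input admitted by Pre_ (len(str(cur)) grows to 6), so fuel 7 is exact there.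
def pvRdA : Nat → Int → List Int
  | 0, _ => []
  | fuel + 1, cur =>
    let last_digit := max (PySem.Int.mod cur 10) 1
    if ¬ (PySem.Str.len (PySem.Int.toStr cur) = 6) then
      (PySem.List.pyRange last_digit 10 1).foldl (fun acc dig => acc ++ pvRdA fuel (cur * 10 + dig)) []
    else [cur]

def returning_digits (cur : Option Int) : List Int :=
  pvRdA 7 (cur.getD 0)

-- ===== PORT B =====
-- one round of B's list comprehension: vals = [v*10+d for v in vals for d in range(max(v%10,1),10)]
def pvStep (vals : List Int) : List Int :=
  vals.flatMap (fun v => (PySem.List.pyRange (max (PySem.Int.mod v 10) 1) 10 1).map (fun d => v * 10 + d))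

-- B's while-loop; the fuel only makes it total, 7 is never exhausted under Pre_ (the head's
-- string length reaches 6 after at most 6 rounds there).
def pvBLoop : Nat → List Int → List Int
  | 0, vals => vals
  | fuel + 1, vals =>
    match vals.head? with
    | none => vals
    | some v =>
      if ¬ (PySem.Str.len (PySem.Int.toStr v) = 6) then pvBLoop fuel (pvStep vals) else vals

def returning_digits_alt (cur : Option Int) : List Int :=
  pvBLoop 7 [cur.getD 0]

-- ===== PRECONDITION & SPEC =====
-- Pre_ excludes exactly the inputs on which the Python A raises RecursionError: cur = -1 (the
-- recursion maps -1 to itself) and cur with a 7-or-more-character str(), where len(str(cur))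
-- can never become 6.  A returns normally on every other int and on None.
def Pre_returning_digits (cur : Option Int) : Prop :=
  cur ≠ some (-1) ∧ -100000 < cur.getD 0 ∧ cur.getD 0 < 1000000
instance (cur : Option Int) : Decidable (Pre_returning_digits cur) := by unfold Pre_returning_digits; infer_instance

def pvWitness_returning_digits : Option Int := none

def Spec_returning_digits (cur : Option Int) (out : List Int) : Prop := out = returning_digits_alt cur
instance (cur : Option Int) (out : List Int) : Decidable (Spec_returning_digits cur out) := by unfold Spec_returning_digits; infer_instance

-- ===== CLAIM (what is proved, stated in full; the proofs are below) =====
def Claim_equal_returning_digits : Prop := ∀ (cur : Option Int), Dom_returning_digits cur → Pre_returning_digits cur → Spec_returning_digits cur (returning_digits cur)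

-- ===== LEMMAS AND PROOFS =====

theorem pv_tdc_eq (n : Nat) : ∀ (f : Nat) (l : List Char), n < f →
    Nat.toDigitsCore 10 f n l = Nat.toDigits 10 n ++ l := by
  induction n using Nat.strong_induction_on with
  | _ n ih =>
    intro f l hf
    match f with
    | f + 1 =>
      by_cases h0 : n / 10 = 0
      · simp [Nat.toDigitsCore, Nat.toDigits, h0]
      · have hlt : n / 10 < n := Nat.div_lt_self (by omega) (by omega)
        rw [show Nat.toDigitsCore 10 (f+1) n l =
              Nat.toDigitsCore 10 f (n / 10) ((n % 10).digitChar :: l) by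
            simp [Nat.toDigitsCore, h0],
          ih (n / 10) hlt f _ (by omega),
          show Nat.toDigits 10 n =
              Nat.toDigitsCore 10 n (n / 10) ((n % 10).digitChar :: []) by
            simp [Nat.toDigits, Nat.toDigitsCore, h0],
          ih (n / 10) hlt n _ (by omega)]
        simp

theorem pv_td_step (m d : Nat) (hm : m ≠ 0) (hd : d < 10) :
    Nat.toDigits 10 (10 * m + d) = Nat.toDigits 10 m ++ [Nat.digitChar d] := by
  have h0 : (10 * m + d) / 10 = m := by omega
  have hmod : (10 * m + d) % 10 = d := by omega
  rw [show Nat.toDigits 10 (10*m+d) =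
        Nat.toDigitsCore 10 (10*m+d) ((10*m+d) / 10) (((10*m+d) % 10).digitChar :: []) by
      simp [Nat.toDigits, Nat.toDigitsCore]; intro h; omega]
  rw [h0, hmod, pv_tdc_eq m (10*m+d) _ (by omega)]

theorem pv_td_len_lt10 (n : Nat) (h : n < 10) : (Nat.toDigits 10 n).length = 1 := by
  have h0 : n / 10 = 0 := by omega
  simp [Nat.toDigits, Nat.toDigitsCore, h0]

theorem pv_td_len_step (m d : Nat) (hm : m ≠ 0) (hd : d < 10) :
    (Nat.toDigits 10 (10 * m + d)).length = (Nat.toDigits 10 m).length + 1 := by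
  rw [pv_td_step m d hm hd]; simp

theorem pv_td_len_pos (n : Nat) : 0 < (Nat.toDigits 10 n).length := by
  by_cases h : n < 10
  · rw [pv_td_len_lt10 n h]; omega
  · have : n = 10 * (n / 10) + n % 10 := by omega
    rw [this, pv_td_len_step _ _ (by omega) (by omega)]; omega

theorem pv_td_len_lower (e : Nat) : ∀ m : Nat, 10 ^ e ≤ m → e + 1 ≤ (Nat.toDigits 10 m).length := by
  induction e with
  | zero => intro m _; have := pv_td_len_pos m; omega
  | succ e ih =>
    intro m hm
    have h10 : 10 ^ e ≤ m / 10 := by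
      have : 10 * 10 ^ e ≤ m := by rw [← pow_succ']; exact hm
      omega
    have hm0 : m / 10 ≠ 0 := by have := Nat.one_le_pow e 10 (by omega); omega
    have : m = 10 * (m / 10) + m % 10 := by omega
    rw [this, pv_td_len_step _ _ hm0 (by omega)]
    have := ih (m / 10) h10
    omega

theorem pv_td_len_pred (m : Nat) (h2 : 2 ≤ m) (h10 : m % 10 ≠ 0) :
    (Nat.toDigits 10 (m - 1)).length = (Nat.toDigits 10 m).length := by
  by_cases hq : m / 10 = 0
  · rw [pv_td_len_lt10 m (by omega), pv_td_len_lt10 (m-1) (by omega)]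
  · have hm : m = 10 * (m / 10) + m % 10 := by omega
    have hm1 : m - 1 = 10 * (m / 10) + (m % 10 - 1) := by omega
    rw [hm1, pv_td_len_step _ _ hq (by omega)]
    conv_rhs => rw [hm, pv_td_len_step _ _ hq (by omega)]

def pvLenC (v : Int) : Nat := (PySem.Int.toChars v).length
def pvGood (v : Int) : Prop := 1 ≤ v ∨ (v ≤ -2 ∧ ¬ (10:Int) ∣ v)

theorem pv_strlen_eq (v : Int) : PySem.Str.len (PySem.Int.toStr v) = (pvLenC v : Int) := by
  simp [PySem.Str.len, PySem.Int.toList_toStr, pvLenC]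

theorem pv_lenC_nonneg_eq (v : Int) (h : 0 ≤ v) : pvLenC v = (Nat.toDigits 10 v.toNat).length := by
  simp [pvLenC, PySem.Int.toChars, not_lt.mpr h]

theorem pv_lenC_neg_eq (v : Int) (h : v < 0) : pvLenC v = (Nat.toDigits 10 v.natAbs).length + 1 := by
  simp [pvLenC, PySem.Int.toChars, h]


theorem pv_lenC_child_pos (v d : Int) (hv : 1 ≤ v) (hd0 : 0 ≤ d) (hd : d < 10) :
    pvLenC (v * 10 + d) = pvLenC v + 1 := by
  rw [pv_lenC_nonneg_eq _ (by omega), pv_lenC_nonneg_eq v (by omega)]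
  have h1 : (v * 10 + d).toNat = 10 * v.toNat + d.toNat := by omega
  rw [h1, pv_td_len_step _ _ (by omega) (by omega)]

theorem pv_lenC_child_neg (v d : Int) (hv : v ≤ -2) (hd1 : 1 ≤ d) (hd : d < 10) :
    pvLenC (v * 10 + d) = (Nat.toDigits 10 (v.natAbs - 1)).length + 2 := by
  have hneg : v * 10 + d < 0 := by nlinarith
  rw [pv_lenC_neg_eq _ hneg]
  have h1 : (v * 10 + d).natAbs = 10 * (v.natAbs - 1) + (10 - d.toNat) := by omega
  rw [h1, pv_td_len_step _ _ (by omega) (by omega)]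

theorem pv_good_child (v d : Int) (hv : 1 ≤ v ∨ v ≤ -2) (hd1 : 1 ≤ d) (hd : d < 10) :
    pvGood (v * 10 + d) := by
  rcases hv with hv | hv
  · left; nlinarith
  · right
    constructor
    · nlinarith
    · intro hdvd
      have : (10:Int) ∣ d := by
        have h10 : (10:Int) ∣ v * 10 := ⟨v, by ring⟩
        omega
      omega

theorem pv_good_child_len (v d : Int) (hg : pvGood v) (hd1 : 1 ≤ d) (hd : d < 10) :
    pvLenC (v * 10 + d) = pvLenC v + 1 := by
  rcases hg with hv | ⟨hv, hdvd⟩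
  · exact pv_lenC_child_pos v d hv (by omega) hd
  · rw [pv_lenC_child_neg v d hv hd1 hd, pv_lenC_neg_eq v (by omega),
      pv_td_len_pred v.natAbs (by omega) (by omega)]

theorem pv_lenC_le6 (c : Int) (hb1 : -100000 < c) (hb2 : c < 1000000) : pvLenC c ≤ 6 := by
  by_cases h : c < 0
  · rw [pv_lenC_neg_eq c h]
    have := Nat.toDigits_length 10 c.natAbs 5 (by omega) (by omega)
    omega
  · rw [pv_lenC_nonneg_eq c (by omega)]
    have := Nat.toDigits_length 10 c.toNat 6 (by omega) (by omega)
    omega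

theorem pv_len_ne6_iff (v : Int) :
    (¬ (PySem.Str.len (PySem.Int.toStr v) = 6)) ↔ pvLenC v ≠ 6 := by
  rw [pv_strlen_eq]; omega

theorem pv_mem_range (v d : Int) (h : d ∈ PySem.List.pyRange (max (PySem.Int.mod v 10) 1) 10 1) :
    1 ≤ d ∧ d < 10 := by
  rw [PySem.List.mem_pyRange_one] at h
  have := le_max_right (PySem.Int.mod v 10) 1
  omega

theorem pv_mem_pvStep (vals : List Int) (w : Int) (h : w ∈ pvStep vals) :
    ∃ v ∈ vals, ∃ d : Int, 1 ≤ d ∧ d < 10 ∧ w = v * 10 + d := by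
  simp only [pvStep, List.mem_flatMap, List.mem_map] at h
  obtain ⟨v, hv, d, hd, rfl⟩ := h
  exact ⟨v, hv, d, (pv_mem_range v d hd).1, (pv_mem_range v d hd).2, rfl⟩

theorem pv_bLoop_flat (f : Nat) : ∀ (L : Nat) (vals : List Int),
    (∀ v ∈ vals, pvGood v ∧ pvLenC v = L) →
    pvBLoop f vals = vals.flatMap (fun v => pvBLoop f [v]) := by
  induction f with
  | zero => intro L vals _; simp [pvBLoop]
  | succ f ih =>
    intro L vals hvals
    match vals with
    | [] => simp [pvBLoop]
    | v :: vs =>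
      have hv := hvals v (by simp)
      by_cases h6 : pvLenC v = 6
      · -- every element has length 6: both sides are the identity
        rw [show pvBLoop (f+1) (v :: vs) = (v :: vs) by
          simp only [pvBLoop, List.head?]
          rw [if_neg (by rw [pv_len_ne6_iff]; omega)]]
        have : ∀ w ∈ v :: vs, pvBLoop (f+1) [w] = [w] := by
          intro w hw
          have hw6 : pvLenC w = 6 := by rw [(hvals w hw).2, ← hv.2, h6]
          simp only [pvBLoop, List.head?]
          rw [if_neg (by rw [pv_len_ne6_iff]; omega)]
        rw [List.flatMap_congr this]  -- may not exist; fallback below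
        simp
      · have hstep : ∀ vals' : List Int, (∀ u ∈ vals', pvGood u ∧ pvLenC u = L) →
            ∀ w ∈ pvStep vals', pvGood w ∧ pvLenC w = L + 1 := by
          intro vals' hvals' w hw
          obtain ⟨u, hu, d, hd1, hd9, rfl⟩ := pv_mem_pvStep _ _ hw
          obtain ⟨hgu, hlu⟩ := hvals' u hu
          refine ⟨pv_good_child u d ?_ hd1 hd9, by rw [pv_good_child_len u d hgu hd1 hd9, hlu]⟩
          rcases hgu with h | h
          · exact Or.inl h
          · exact Or.inr h.1
        rw [show pvBLoop (f+1) (v::vs) = pvBLoop f (pvStep (v::vs)) by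
            simp only [pvBLoop, List.head?]
            rw [if_pos ((pv_len_ne6_iff v).mpr h6)]]
        rw [ih (L+1) _ (hstep _ hvals)]
        have hsingle : ∀ u ∈ v :: vs, pvBLoop (f+1) [u] =
            (pvStep [u]).flatMap (fun w => pvBLoop f [w]) := by
          intro u hu
          have hu6 : pvLenC u ≠ 6 := by
            have := (hvals u hu).2; rw [this, ← hv.2]; exact hv.2 ▸ h6
          have h1 : pvBLoop (f+1) [u] = pvBLoop f (pvStep [u]) := by
            simp only [pvBLoop, List.head?]
            rw [if_pos ((pv_len_ne6_iff u).mpr hu6)]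
          rw [h1, ih (L+1) _ (hstep [u] (by intro x hx; simp only [List.mem_singleton] at hx; rw [hx]; exact hvals u hu))]
        rw [List.flatMap_congr hsingle]
        simp [pvStep, List.flatMap_assoc]


theorem pv_rdA_six (f : Nat) (c : Int) (h6 : pvLenC c = 6) : pvRdA (f+1) c = [c] := by
  simp only [pvRdA]
  rw [if_neg (by rw [pv_len_ne6_iff]; omega)]

theorem pv_bLoop_six (f : Nat) (c : Int) (h6 : pvLenC c = 6) : pvBLoop (f+1) [c] = [c] := by
  simp only [pvBLoop, List.head?]
  rw [if_neg (by rw [pv_len_ne6_iff]; omega)]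

theorem pv_rdA_expand (f : Nat) (c : Int) (h6 : pvLenC c ≠ 6) :
    pvRdA (f+1) c = (PySem.List.pyRange (max (PySem.Int.mod c 10) 1) 10 1).flatMap
      (fun d => pvRdA f (c * 10 + d)) := by
  simp only [pvRdA]
  rw [if_pos ((pv_len_ne6_iff c).mpr h6), PySem.List.foldl_append_eq_flatMap]
  simp

theorem pv_bLoop_expand (f : Nat) (c : Int) (h6 : pvLenC c ≠ 6) :
    pvBLoop (f+1) [c] = pvBLoop f (pvStep [c]) := by
  simp only [pvBLoop, List.head?]
  rw [if_pos ((pv_len_ne6_iff c).mpr h6)]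

theorem pv_bLoop_expand_flat (f : Nat) (c : Int) (L : Nat) (h6 : pvLenC c ≠ 6)
    (hch : ∀ d : Int, 1 ≤ d → d < 10 → pvGood (c * 10 + d) ∧ pvLenC (c * 10 + d) = L) :
    pvBLoop (f+1) [c] = (PySem.List.pyRange (max (PySem.Int.mod c 10) 1) 10 1).flatMap
      (fun d => pvBLoop f [c * 10 + d]) := by
  rw [pv_bLoop_expand f c h6]
  rw [pv_bLoop_flat f L (pvStep [c]) (by
    intro w hw
    obtain ⟨u, hu, d, hd1, hd9, rfl⟩ := pv_mem_pvStep _ _ hw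
    simp only [List.mem_singleton] at hu
    subst hu
    exact hch d hd1 hd9)]
  simp only [pvStep, List.flatMap_cons, List.flatMap_nil, List.append_nil, List.flatMap_map]

theorem pv_rdA_eq : ∀ (f : Nat) (c : Int), pvGood c → pvLenC c ≤ 6 → 7 ≤ f + pvLenC c →
    pvRdA f c = pvBLoop f [c] := by
  intro f
  induction f with
  | zero => intro c _ hle hf; omega
  | succ f ih =>
    intro c hg hle hf
    by_cases h6 : pvLenC c = 6
    · rw [pv_rdA_six f c h6, pv_bLoop_six f c h6]
    · have hch : ∀ d : Int, 1 ≤ d → d < 10 →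
          pvGood (c * 10 + d) ∧ pvLenC (c * 10 + d) = pvLenC c + 1 := by
        intro d hd1 hd9
        refine ⟨pv_good_child c d ?_ hd1 hd9, pv_good_child_len c d hg hd1 hd9⟩
        rcases hg with h | h
        · exact Or.inl h
        · exact Or.inr h.1
      rw [pv_rdA_expand f c h6, pv_bLoop_expand_flat f c (pvLenC c + 1) h6 hch]
      refine List.flatMap_congr ?_
      intro d hd
      obtain ⟨hd1, hd9⟩ := pv_mem_range c d hd
      obtain ⟨hgc, hlc⟩ := hch d hd1 hd9
      exact ih (c * 10 + d) hgc (by omega) (by omega)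

theorem pv_main (c : Int) (hc : c ≠ -1) (hb1 : -100000 < c) (hb2 : c < 1000000) :
    pvRdA 7 c = pvBLoop 7 [c] := by
  have hle : pvLenC c ≤ 6 := pv_lenC_le6 c hb1 hb2
  by_cases h6 : pvLenC c = 6
  · rw [pv_rdA_six 6 c h6, pv_bLoop_six 6 c h6]
  · obtain ⟨L, hL1, hL6, hch⟩ : ∃ L : Nat, 1 ≤ L ∧ L ≤ 6 ∧
        ∀ d : Int, 1 ≤ d → d < 10 → pvGood (c * 10 + d) ∧ pvLenC (c * 10 + d) = L := by
      rcases lt_trichotomy c 0 with hneg | hzero | hpos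
      · -- c ≤ -2 (c = -1 excluded)
        have hc2 : c ≤ -2 := by omega
        refine ⟨(Nat.toDigits 10 (c.natAbs - 1)).length + 2, by omega, ?_, ?_⟩
        · have hlen : pvLenC c = (Nat.toDigits 10 c.natAbs).length + 1 := pv_lenC_neg_eq c hneg
          have hlow : c.natAbs < 10 ^ 4 := by
            by_contra hge
            have := pv_td_len_lower 4 c.natAbs (by omega)
            omega
          have := Nat.toDigits_length 10 (c.natAbs - 1) 4 (by omega) (by omega)
          omega
        · intro d hd1 hd9
          exact ⟨pv_good_child c d (Or.inr hc2) hd1 hd9, pv_lenC_child_neg c d hc2 hd1 hd9⟩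
      · refine ⟨1, by omega, by omega, ?_⟩
        intro d hd1 hd9
        subst hzero
        constructor
        · rw [show (0:Int) * 10 + d = d by ring]; exact Or.inl hd1
        · rw [show (0:Int) * 10 + d = d by ring, pv_lenC_nonneg_eq d (by omega),
            pv_td_len_lt10 d.toNat (by omega)]
      · refine ⟨pvLenC c + 1, by omega, by omega, ?_⟩
        intro d hd1 hd9
        exact ⟨pv_good_child c d (Or.inl (by omega)) hd1 hd9,
          pv_lenC_child_pos c d (by omega) (by omega) hd9⟩
    rw [pv_rdA_expand 6 c h6, pv_bLoop_expand_flat 6 c L h6 hch]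
    refine List.flatMap_congr ?_
    intro d hd
    obtain ⟨hd1, hd9⟩ := pv_mem_range c d hd
    obtain ⟨hgc, hlc⟩ := hch d hd1 hd9
    exact pv_rdA_eq 6 (c * 10 + d) hgc (by omega) (by omega)

-- ===== VERDICT (by name: the statement is the Claim_ definition above) =====
theorem returning_digits_spec : Claim_equal_returning_digits := by
  intro cur _ hpre
  unfold Spec_returning_digits returning_digits returning_digits_alt
  match cur with
  | none => exact pv_main 0 (by decide) (by decide) (by decide)
  | some c =>
    obtain ⟨h1, h2, h3⟩ := hpre
    exact pv_main c (by simpa using h1) (by simpa using h2) (by simpa using h3)
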